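-- pv_equiv track=rewrite | github.com/shaofengzhu/codespacefunc | api/metadata.py | _find_doc
-- ===== SOURCE A (Python) =====
-- def _find_doc(lines, name):
--     parts = None
--     for line in lines:
--         if parts is None:
--             if not line.startswith(name):
--                 continue
--             line = line[len(name):].lstrip()
--             if line.startswith(":"):
--                 line = line.lstrip(":").lstrip()
--                 parts = [line]
--         elif line:
--             parts.append(line)
--         else:
--             break
--     if parts:
--         return " ".join(parts)
-- ===== SOURCE B (Python) =====
-- def _find_doc(lines, name):
--     # Two-phase: locate the header line, then slice off the tail up to the
--     # first blank line; returns as soon as the header is found.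
--     for i, line in enumerate(lines):
--         if line.startswith(name):
--             rest = line[len(name):].lstrip()
--             if rest.startswith(":"):
--                 tail = lines[i + 1:]
--                 j = next((k for k, l in enumerate(tail) if not l), len(tail))
--                 return " ".join([rest.lstrip(":").lstrip()] + tail[:j])
--     return None
-- ===== Notes on version B (the rewrite author's own statement) =====
-- stated objective: simpler
-- what changed: Replaces A's single stateful loop (Optional accumulator driving three modes) with an early-return search for the header line followed by a slice of the tail up to the first blank line.
import Mathlib
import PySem

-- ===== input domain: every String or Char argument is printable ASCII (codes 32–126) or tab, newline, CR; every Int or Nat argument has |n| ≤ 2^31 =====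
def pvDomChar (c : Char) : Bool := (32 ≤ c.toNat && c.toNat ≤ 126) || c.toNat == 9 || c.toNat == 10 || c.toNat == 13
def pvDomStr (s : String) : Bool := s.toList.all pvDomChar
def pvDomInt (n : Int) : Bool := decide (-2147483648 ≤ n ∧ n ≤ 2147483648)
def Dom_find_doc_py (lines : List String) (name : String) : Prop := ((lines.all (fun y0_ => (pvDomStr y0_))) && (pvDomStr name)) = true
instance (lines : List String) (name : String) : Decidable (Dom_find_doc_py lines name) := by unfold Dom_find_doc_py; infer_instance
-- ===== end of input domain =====

-- B replaces A's single stateful loop with a find-the-header early return plus a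
-- slice of the tail up to the first blank line (objective: simpler).

-- s.lstrip(":") — hand port, exact: drops all leading ':' characters (shared primitive of both Pythons)
def lstripColon (s : String) : String := String.ofList (s.toList.dropWhile (· == ':'))

-- ===== PORT A =====
-- A's loop: state 'parts : Option (List String)', three modes, 'break' returns the state
def findDocLoopA (name : String) : List String → Option (List String) → Option (List String)
  | [], parts => parts
  | line :: rest, parts =>
    match parts with
    | none =>
      if PySem.Str.startswith line name = false then
        findDocLoopA name rest none
      else
        let line1 := PySem.Str.lstrip (PySem.Str.slice line (some (PySem.Str.len name)) none)
        if PySem.Str.startswith line1 ":" then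
          findDocLoopA name rest (some [PySem.Str.lstrip (lstripColon line1)])
        else
          findDocLoopA name rest none
    | some ps =>
      if (line == "") = false then
        findDocLoopA name rest (some (ps ++ [line]))
      else
        some ps

def find_doc_py (lines : List String) (name : String) : Option String :=
  match findDocLoopA name lines none with
  | none => none
  | some ps => if ps.isEmpty then none else some (PySem.Str.join " " ps)

-- ===== PORT B =====
-- next((k for k, l in enumerate(tail) if not l), len(tail))
def firstEmptyIdx (tail : List String) : Nat :=
  (tail.findIdx? (fun l => l == "")).getD tail.length

def find_doc_py_alt (lines : List String) (name : String) : Option String :=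
  match lines with
  | [] => none
  | line :: tail =>
    if PySem.Str.startswith line name then
      let rest := PySem.Str.lstrip (PySem.Str.slice line (some (PySem.Str.len name)) none)
      if PySem.Str.startswith rest ":" then
        let j := firstEmptyIdx tail
        some (PySem.Str.join " " (PySem.Str.lstrip (lstripColon rest) :: tail.take j))
      else find_doc_py_alt tail name
    else find_doc_py_alt tail name

-- ===== PRECONDITION & SPEC =====
def Spec_find_doc_py (lines : List String) (name : String) (out : Option String) : Prop := out = find_doc_py_alt lines name
instance (lines : List String) (name : String) (out : Option String) : Decidable (Spec_find_doc_py lines name out) := by unfold Spec_find_doc_py; infer_instance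

-- ===== CLAIM (what is proved, stated in full; the proofs are below) =====
def Claim_equal_find_doc_py : Prop := ∀ (lines : List String) (name : String), Dom_find_doc_py lines name → Spec_find_doc_py lines name (find_doc_py lines name)

-- ===== LEMMAS AND PROOFS =====

-- once the header is found, A's loop appends exactly the lines before the first blank one
theorem loopA_some (name : String) (rest : List String) (ps : List String) :
    findDocLoopA name rest (some ps) = some (ps ++ rest.takeWhile (fun l => !(l == ""))) := by
  induction rest generalizing ps with
  | nil => simp [findDocLoopA]
  | cons line r ih =>
    by_cases h : line = ""
    · simp [findDocLoopA, h, List.takeWhile]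
    · have hb : (line == "") = false := by simpa using h
      simp [findDocLoopA, hb, ih, List.takeWhile]

-- B's slice tail[:j] is the prefix of non-blank lines
theorem take_firstEmptyIdx (tail : List String) :
    tail.take (firstEmptyIdx tail) = tail.takeWhile (fun l => !(l == "")) := by
  induction tail with
  | nil => simp [firstEmptyIdx]
  | cons line r ih =>
    by_cases h : line = ""
    · simp [firstEmptyIdx, List.findIdx?_cons, h, List.takeWhile]
    · have hb : (line == "") = false := by simpa using h
      cases hfi : r.findIdx? (fun l => l == "") with
      | none =>
        have ih2 : r = r.takeWhile (fun l => !(l == "")) := by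
          simpa [firstEmptyIdx, hfi] using ih
        simp [firstEmptyIdx, List.findIdx?_cons, hb, hfi, List.takeWhile, ← ih2]
      | some k =>
        simp [firstEmptyIdx, hfi] at ih
        simp [firstEmptyIdx, List.findIdx?_cons, hb, hfi, List.takeWhile, ih]

theorem find_doc_eq (name : String) (lines : List String) :
    find_doc_py lines name = find_doc_py_alt lines name := by
  induction lines with
  | nil => simp [find_doc_py, find_doc_py_alt, findDocLoopA]
  | cons line rest ih =>
    by_cases hs : PySem.Chars.startswith line.toList name.toList = true
    · by_cases hc : PySem.Chars.startswith
        (PySem.Chars.lstrip (List.drop name.length line.toList)) [':'] = true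
      · simp [find_doc_py, find_doc_py_alt, findDocLoopA, hs, hc, loopA_some, take_firstEmptyIdx]
      · simp only [find_doc_py, find_doc_py_alt, findDocLoopA] at ih ⊢
        simp [hs, hc]
        simpa using ih
    · simp only [find_doc_py, find_doc_py_alt, findDocLoopA] at ih ⊢
      simp [hs]
      simpa using ih

-- ===== VERDICT (by name: the statement is the Claim_ definition above) =====
theorem find_doc_py_spec : Claim_equal_find_doc_py := by
  intro lines name _
  unfold Spec_find_doc_py
  exact find_doc_eq name lines
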